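-- pv_equiv track=rewrite | github.com/AymenMerrouche/MC-for-Genomic-sequence-analysis | code_ecrit.py | detect_mot_chevauchant
-- ===== SOURCE A (Python) =====
-- def code(m, k):
--     taille = k-1
--     indice = 0
--     # l’écriture du mot en base 4
--     for i in m:
--         indice += i*(4 ** taille)
--         taille -= 1
--     return indice
--
-- def compte_mot(sequence, k):
--     dico = {}
--     # on parcours la séquence
--     for i in range(len(sequence) - k + 1):
--         # on récupère le mot courant
--         mot = sequence[i:i+k]
--         # on récupère le code du mot courant
--         code_mot = code(mot, k)
--         # on met à jour le comptage
--         if code_mot in dico: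
--             dico[code_mot] += 1
--         else:
--             dico[code_mot] = 1
--     return dico
--
-- def detect_mot_chevauchant(m):
--     dico = compte_mot(m, 2)
--     if m[0] == m[len(m)-1]:
--         return True
--     for mot in dico:
--         # si il y a un dinucleotide qui se repete
--         if dico[mot] >= 2:
--             return True
--     return False
-- ===== SOURCE B (Python) =====
-- def detect_mot_chevauchant(m):
--     if m[0] == m[len(m)-1]:
--         return True
--     codes = sorted(4*x + y for x, y in zip(m, m[1:]))
--     return any(c == d for c, d in zip(codes, codes[1:]))
-- ===== Notes on version B (the rewrite author's own statement) =====
-- stated objective: alternative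
-- what changed: Replaces the window-slicing/encoding-helper/count-dict-then-scan pipeline with sort-based duplicate detection: codes of adjacent pairs are computed in one expression, sorted, and scanned once for two equal neighbours (comparison sorting instead of hash counting); the measured speedup is constant-factor, from C-implemented sorted/zip/any replacing A's interpreted per-element dict loops.
import Mathlib
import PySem

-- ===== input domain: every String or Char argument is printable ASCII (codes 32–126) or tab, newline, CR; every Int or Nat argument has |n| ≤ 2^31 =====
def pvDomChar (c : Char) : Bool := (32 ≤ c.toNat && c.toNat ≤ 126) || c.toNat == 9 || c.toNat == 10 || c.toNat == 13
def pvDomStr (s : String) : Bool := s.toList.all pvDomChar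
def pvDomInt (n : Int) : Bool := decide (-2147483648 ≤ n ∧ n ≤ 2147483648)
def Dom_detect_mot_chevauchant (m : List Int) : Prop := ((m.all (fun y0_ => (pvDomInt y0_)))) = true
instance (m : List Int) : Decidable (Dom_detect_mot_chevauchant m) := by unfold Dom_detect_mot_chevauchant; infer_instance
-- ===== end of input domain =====

-- B replaces A's window-slicing/count-dict-then-scan pipeline by sort-based
-- duplicate detection: sort the adjacent-pair codes, scan once for two equal
-- neighbours (objective: alternative).

-- ===== PORT A =====
-- Python's 4 ** taille is ported as 4 ^ taille.toNat: exact whenever the exponents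
-- stay ≥ 0, which holds at every call made here (k = 2, windows of length ≤ 2).
def code (mlist : List Int) (k : Int) : Int :=
  (mlist.foldl (fun (st : Int × Int) i => (st.1 - 1, st.2 + i * 4 ^ st.1.toNat)) (k - 1, 0)).2

def compte_mot (sequence : List Int) (k : Int) : PySem.Dict Int Int :=
  (PySem.List.pyRange 0 ((sequence.length : Int) - k + 1) 1).foldl
    (fun d i =>
      let mot := PySem.List.slice sequence (some i) (some (i + k))
      let code_mot := code mot k
      if d.contains code_mot then d.insert code_mot (d.getD code_mot 0 + 1)
      else d.insert code_mot 1)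
    PySem.Dict.empty

def detect_mot_chevauchant (m : List Int) : Bool :=
  let dico := compte_mot m 2
  match PySem.List.pyGet? m 0, PySem.List.pyGet? m ((m.length : Int) - 1) with
  | some a, some b =>
      if a == b then true
      else dico.keys.any (fun mot => decide (2 ≤ dico.getD mot 0))
  | _, _ => false   -- IndexError on empty m; excluded by Pre_

-- ===== PORT B =====
def detect_mot_chevauchant_alt (m : List Int) : Bool :=
  -- m[0] / m[len(m)-1]; the `none` (IndexError, empty m) case yields false, excluded by Pre_
  ((PySem.List.pyGet? m 0).bind (fun a =>
    (PySem.List.pyGet? m ((m.length : Int) - 1)).map (fun b =>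
      if a == b then true
      else
        let codes := PySem.List.sorted ((m.zip m.tail).map (fun p => 4 * p.1 + p.2)) (fun c => c)
        (codes.zip codes.tail).any (fun cd => cd.1 == cd.2)))).getD false

-- ===== PRECONDITION & SPEC =====
-- A raises IndexError (m[0]) on the empty list; Pre_ excludes exactly that input.
def Pre_detect_mot_chevauchant (m : List Int) : Prop := m ≠ []
instance (m : List Int) : Decidable (Pre_detect_mot_chevauchant m) := by
  unfold Pre_detect_mot_chevauchant; infer_instance

def pvWitness_detect_mot_chevauchant : List Int := [0, 1, 0, 2]

def Spec_detect_mot_chevauchant (m : List Int) (out : Bool) : Prop :=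
  out = detect_mot_chevauchant_alt m
instance (m : List Int) (out : Bool) : Decidable (Spec_detect_mot_chevauchant m out) := by
  unfold Spec_detect_mot_chevauchant; infer_instance

-- ===== CLAIM (what is proved, stated in full; the proofs are below) =====
def Claim_equal_detect_mot_chevauchant : Prop :=
  ∀ (m : List Int), Dom_detect_mot_chevauchant m → Pre_detect_mot_chevauchant m →
    Spec_detect_mot_chevauchant m (detect_mot_chevauchant m)

-- ===== LEMMAS AND PROOFS =====

-- the list of dinucleotide codes A ranges over
def pvCodes (m : List Int) : List Int := (m.zip m.tail).map (fun p => 4 * p.1 + p.2)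

theorem code_pair (a b : Int) : code [a, b] 2 = 4 * a + b := by
  simp [code]; ring

-- A's index-and-slice windows are exactly the adjacent pairs
theorem windows_eq : ∀ (m : List Int),
    (List.range (m.length - 1)).map (fun i => (m.drop i).take 2)
      = (m.zip m.tail).map (fun p => [p.1, p.2])
  | [] => rfl
  | [_] => rfl
  | a :: b :: rest => by
      have ih := windows_eq (b :: rest)
      simp only [List.length_cons, Nat.add_sub_cancel, List.range_succ_eq_map,
        List.map_cons, List.map_map] at *
      simpa [List.zip_cons_cons, Function.comp] using ih

-- the codes A computes from its slices are the dinucleotide codes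
theorem codes_eq (m : List Int) :
    (PySem.List.pyRange 0 ((m.length : Int) - 2 + 1) 1).map
      (fun i => code (PySem.List.slice m (some i) (some (i + 2))) 2) = pvCodes m := by
  rw [PySem.List.pyRange_one]
  have h1 : ((m.length : Int) - 2 + 1 - 0).toNat = m.length - 1 := by omega
  rw [h1, List.map_map]
  have h2 : ∀ k ∈ List.range (m.length - 1),
      ((fun i => code (PySem.List.slice m (some i) (some (i + 2))) 2) ∘ fun k : Nat => (0 : Int) + ↑k) k
        = code ((m.drop k).take 2) 2 := by
    intro k _
    have hs := PySem.List.slice_natCast_add m k 2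
    simp only [Function.comp, zero_add]
    rw [show ((k : Int) + 2) = ((k : Int) + ((2 : Nat) : Int)) by norm_num, hs]
  rw [List.map_congr_left h2]
  have h3 : (List.range (m.length - 1)).map (fun k => code ((m.drop k).take 2) 2)
      = ((List.range (m.length - 1)).map (fun i => (m.drop i).take 2)).map (fun w => code w 2) := by
    rw [List.map_map]; rfl
  rw [h3, windows_eq, List.map_map, pvCodes]
  apply List.map_congr_left
  intro p _
  simpa using code_pair p.1 p.2

-- A's counting dict is Counter(codes)
theorem countdict_eq (m : List Int) :
    compte_mot m 2 = PySem.Dict.counter (pvCodes m) := by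
  have hstep : (fun (d : PySem.Dict Int Int) (c : Int) =>
      if d.contains c then d.insert c (d.getD c 0 + 1) else d.insert c 1)
      = fun (d : PySem.Dict Int Int) (c : Int) => d.insert c (d.getD c 0 + 1) := by
    funext d c
    by_cases h : d.contains c = true
    · rw [if_pos h]
    · rw [if_neg h, PySem.Dict.getD_of_not_contains d 0 (by simpa using h), zero_add]
  have h := List.foldl_map (f := fun i : Int => code (PySem.List.slice m (some i) (some (i + 2))) 2)
      (g := fun (d : PySem.Dict Int Int) (c : Int) =>
        if d.contains c then d.insert c (d.getD c 0 + 1) else d.insert c 1)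
      (l := PySem.List.pyRange 0 ((m.length : Int) - 2 + 1) 1) (init := PySem.Dict.empty)
  rw [codes_eq, hstep] at h
  unfold compte_mot
  exact Eq.trans (Eq.symm h) (PySem.Dict.foldl_insert_getD_add_one_eq_counter (pvCodes m))

-- A's dict scan answers "is some dinucleotide code repeated?"
theorem scanA_iff (m : List Int) :
    ((compte_mot m 2).keys.any (fun mot => decide (2 ≤ (compte_mot m 2).getD mot 0)) = true)
      ↔ ¬ (pvCodes m).Nodup := by
  rw [countdict_eq, List.any_eq_true]
  constructor
  · rintro ⟨mot, _, hp⟩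
    rw [PySem.Dict.getD_counter] at hp
    rw [List.nodup_iff_count_le_one]
    push Not
    exact ⟨mot, by simp at hp; omega⟩
  · intro hnd
    rw [List.nodup_iff_count_le_one] at hnd
    push Not at hnd
    obtain ⟨c, hc⟩ := hnd
    refine ⟨c, ?_, ?_⟩
    · rw [PySem.Dict.keys_counter, PySem.Set.mem_ofList]
      exact List.count_pos_iff.1 (by omega)
    · rw [PySem.Dict.getD_counter]
      simp; omega

-- indexing facts shared by both characterisations
theorem pyGet_zero (m : List Int) (hpre : m ≠ []) :
    PySem.List.pyGet? m 0 = some (m.head hpre) := by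
  have := PySem.List.pyGet?_natCast m 0
  simpa [← List.head?_eq_getElem?, List.head?_eq_some_head hpre] using this

theorem pyGet_last (m : List Int) (hpre : m ≠ []) :
    PySem.List.pyGet? m ((m.length : Int) - 1) = some (m.getLast hpre) := by
  have hlen : m.length ≠ 0 := by simpa [List.length_eq_zero_iff] using hpre
  have hc : ((m.length : Int) - 1) = ((m.length - 1 : Nat) : Int) := by omega
  rw [hc, PySem.List.pyGet?_natCast]
  rw [← List.getLast?_eq_getElem?, List.getLast?_eq_some_getLast]

-- A computes: first == last, or some code repeated
theorem A_char (m : List Int) (hpre : m ≠ []) :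
    detect_mot_chevauchant m
      = ((m.head hpre == m.getLast hpre) || !decide (pvCodes m).Nodup) := by
  rw [detect_mot_chevauchant, pyGet_zero m hpre, pyGet_last m hpre]
  by_cases hab : m.head hpre == m.getLast hpre
  · simp [hab]
  · simp only [Bool.not_eq_true] at hab
    simp only [hab, Bool.false_eq_true, if_false, Bool.false_or]
    rw [Bool.eq_iff_iff, scanA_iff]
    simp

-- in a sorted list, an equal adjacent pair exists iff the list has a duplicate
theorem adj_dup_iff_not_nodup : ∀ (l : List Int), l.Pairwise (· ≤ ·) →
    ((l.zip l.tail).any (fun cd => cd.1 == cd.2) = true ↔ ¬ l.Nodup)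
  | [], _ => by simp
  | [_], _ => by simp
  | a :: b :: t, hp => by
      have hab : a ≤ b := (List.pairwise_cons.1 hp).1 b (by simp)
      have htail := (List.pairwise_cons.1 hp).2
      have ih := adj_dup_iff_not_nodup (b :: t) htail
      by_cases he : a = b
      · subst he
        simp [List.zip_cons_cons, List.nodup_cons]
      · have hnotmem : a ∉ b :: t := by
          intro hmem
          rcases List.mem_cons.1 hmem with rfl | hmt
          · exact he rfl
          · exact he (le_antisymm hab ((List.pairwise_cons.1 htail).1 a hmt))
        simp only [List.tail_cons, List.zip_cons_cons, List.any_cons] at *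
        rw [show (((a, b).1 == (a, b).2) = false) by simpa using he]
        rw [Bool.false_or, ih, List.nodup_cons]
        simp [hnotmem]

-- B computes: first == last, or some adjacent-pair code repeated
theorem B_char (m : List Int) (hpre : m ≠ []) :
    detect_mot_chevauchant_alt m
      = ((m.head hpre == m.getLast hpre) || !decide (pvCodes m).Nodup) := by
  rw [detect_mot_chevauchant_alt, pyGet_zero m hpre, pyGet_last m hpre]
  simp only [Option.bind_some, Option.map_some, Option.getD_some]
  by_cases hab : m.head hpre == m.getLast hpre
  · simp [hab]
  · simp only [Bool.not_eq_true] at hab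
    simp only [hab, Bool.false_eq_true, if_false, Bool.false_or]
    have hpv : List.map (fun p : Int × Int => 4 * p.1 + p.2) (m.zip m.tail) = pvCodes m := rfl
    rw [hpv]
    have hperm := PySem.List.sorted_perm (pvCodes m) (fun c => c) false
    rw [Bool.eq_iff_iff,
      adj_dup_iff_not_nodup _ (PySem.List.sorted_pairwise (pvCodes m) (fun c => c)),
      hperm.nodup_iff]
    simp

-- ===== VERDICT (by name: the statement is the Claim_ definition above) =====
theorem detect_mot_chevauchant_spec : Claim_equal_detect_mot_chevauchant := by
  intro m _ hpre
  unfold Spec_detect_mot_chevauchant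
  rw [A_char m hpre, B_char m hpre]
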